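-- pv_equiv track=rewrite | github.com/FrichXi/funeralai-web4 | scripts/graph_utils.py | pick_best_description
-- ===== SOURCE A (Python) =====
-- from typing import Iterable
--
-- def pick_best_description(descriptions: Iterable[str], max_len: int = 200) -> str:
--     cleaned: list[str] = []
--     seen = set()
--     for description in descriptions:
--         for part in (description or "").split("<SEP>"):
--             text = part.strip()
--             if not text or text in seen:
--                 continue
--             seen.add(text)
--             cleaned.append(text)
--
--     if not cleaned:
--         return ""
--
--     best = max(cleaned, key=len)
--     if len(best) > max_len:
--         return best[:max_len] + "..."
--     return best
-- ===== SOURCE B (Python) =====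
-- def pick_best_description(descriptions, max_len=200):
--     # One pass tracking the longest stripped non-empty part; dedup is unnecessary
--     # because duplicates can never change the first-wins maximum.
--     best = None
--     for description in descriptions:
--         for part in (description or "").split("<SEP>"):
--             text = part.strip()
--             if not text:
--                 continue
--             if best is None or len(text) > len(best):
--                 best = text
--     if best is None:
--         return ""
--     if len(best) > max_len:
--         return best[:max_len] + "..."
--     return best
-- ===== Notes on version B (the rewrite author's own statement) =====
-- stated objective: simpler
-- what changed: Replaces the seen-set plus cleaned-list accumulation followed by a max(key=len) pass with a single pass that directly tracks the longest stripped non-empty part (strict > keeps first-wins ties; dedup cannot affect the maximum).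
import Mathlib
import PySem

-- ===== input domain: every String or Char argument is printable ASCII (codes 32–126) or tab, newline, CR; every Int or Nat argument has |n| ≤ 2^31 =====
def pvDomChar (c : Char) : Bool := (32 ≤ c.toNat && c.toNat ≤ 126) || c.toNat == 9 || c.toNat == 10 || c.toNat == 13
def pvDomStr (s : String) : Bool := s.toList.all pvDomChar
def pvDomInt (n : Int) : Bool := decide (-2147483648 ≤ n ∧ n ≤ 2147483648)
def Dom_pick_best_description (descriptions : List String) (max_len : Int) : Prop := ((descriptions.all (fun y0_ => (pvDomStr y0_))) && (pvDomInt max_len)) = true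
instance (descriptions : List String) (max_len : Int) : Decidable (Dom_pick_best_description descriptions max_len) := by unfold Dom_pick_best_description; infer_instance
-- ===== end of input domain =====

-- B replaces A's seen-set + cleaned-list accumulation and final max(key=len) pass
-- with a single pass tracking the longest stripped non-empty part (simpler).


-- ===== PORT A =====
-- A's inner loop body: skip empty/seen texts, else record in (seen, cleaned)
def pvCollect (st : PySem.Set String × List String) (part : String) : PySem.Set String × List String :=
  let text := PySem.Str.strip part
  if text == "" || st.1.contains text then st
  else (st.1.add text, st.2 ++ [text])

def pick_best_description (descriptions : List String) (max_len : Int) : String :=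
  let st := descriptions.foldl
    (fun st description =>
      (((PySem.Str.split? (if description == "" then "" else description) "<SEP>").getD []).foldl
        pvCollect st))
    (PySem.Set.ofList [], ([] : List String))
  if st.2 == [] then ""
  else
    let best := PySem.List.maxD st.2 PySem.Str.len ""
    if PySem.Str.len best > max_len then PySem.Str.slice best none (some max_len) ++ "..." else best

-- ===== PORT B =====
-- B's inner loop body: keep the longest stripped non-empty text seen so far
def pvBetter (best : Option String) (part : String) : Option String :=
  let text := PySem.Str.strip part
  if text == "" then best
  else
    match best with
    | none => some text
    | some b => if PySem.Str.len b < PySem.Str.len text then some text else some b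

def pick_best_description_alt (descriptions : List String) (max_len : Int) : String :=
  match descriptions.foldl
    (fun best description =>
      (((PySem.Str.split? (if description == "" then "" else description) "<SEP>").getD []).foldl
        pvBetter best))
    none with
  | none => ""
  | some b => if PySem.Str.len b > max_len then PySem.Str.slice b none (some max_len) ++ "..." else b

-- ===== PRECONDITION & SPEC =====
def Spec_pick_best_description (descriptions : List String) (max_len : Int) (out : String) : Prop := out = pick_best_description_alt descriptions max_len
instance (descriptions : List String) (max_len : Int) (out : String) : Decidable (Spec_pick_best_description descriptions max_len out) := by unfold Spec_pick_best_description; infer_instance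

-- ===== CLAIM (what is proved, stated in full; the proofs are below) =====
def Claim_equal_pick_best_description : Prop := ∀ (descriptions : List String) (max_len : Int), Dom_pick_best_description descriptions max_len → Spec_pick_best_description descriptions max_len (pick_best_description descriptions max_len)

-- ===== LEMMAS AND PROOFS =====

-- the step function inside PySem.List.max? (key = PySem.Str.len), named for the proofs
def pvMaxStep (acc : Option String) (x : String) : Option String :=
  match acc with
  | none => some x
  | some m => if PySem.Str.len m < PySem.Str.len x then some x else some m

lemma pv_max?_eq (xs : List String) :
    PySem.List.max? xs PySem.Str.len = xs.foldl pvMaxStep none := by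
  unfold PySem.List.max?
  congr 1
  funext acc x
  cases acc <;> rfl

lemma pv_foldl_step_some (l : List String) (b : String) :
    (List.foldl pvMaxStep (some b) l).isSome := by
  induction l generalizing b with
  | nil => rfl
  | cons y l ih =>
    simp only [List.foldl_cons, pvMaxStep]
    split <;> apply ih

lemma pv_max?_isSome (x : String) (l : List String) :
    (PySem.List.max? (x :: l) PySem.Str.len).isSome := by
  rw [pv_max?_eq]
  exact pv_foldl_step_some l x

lemma pv_max?_append (cleaned : List String) (t : String) :
    PySem.List.max? (cleaned ++ [t]) PySem.Str.len
      = pvMaxStep (PySem.List.max? cleaned PySem.Str.len) t := by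
  rw [pv_max?_eq, pv_max?_eq, List.foldl_append]
  rfl

-- B's step on a part whose stripped text is non-empty is exactly max?'s step
lemma pv_better_ne (best : Option String) (p : String) (he : ¬ PySem.Str.strip p = "") :
    pvBetter best p = pvMaxStep best (PySem.Str.strip p) := by
  cases best <;> simp [pvBetter, pvMaxStep, he]

-- a member of the list cannot beat the running maximum
lemma pv_better_of_mem (cleaned : List String) (p : String)
    (h : PySem.Str.strip p ∈ cleaned) :
    pvBetter (PySem.List.max? cleaned PySem.Str.len) p
      = PySem.List.max? cleaned PySem.Str.len := by
  by_cases he : PySem.Str.strip p = ""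
  · simp [pvBetter, he]
  · rw [pv_better_ne _ _ he]
    cases cleaned with
    | nil => cases h
    | cons x l =>
      obtain ⟨m, hm⟩ := Option.isSome_iff_exists.mp (pv_max?_isSome x l)
      have hle : PySem.Str.len (PySem.Str.strip p) ≤ PySem.Str.len m :=
        PySem.List.max?_isMax hm _ h
      rw [hm]
      simp only [pvMaxStep]
      rw [if_neg (not_lt.mpr hle)]

-- invariant through one parts list: A's (seen, cleaned) state vs B's running best
lemma pv_inner (ps : List String) (seen : PySem.Set String) (cleaned : List String)
    (h : ∀ t : String, seen.contains t = true ↔ t ∈ cleaned) :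
    (∀ t : String, (ps.foldl pvCollect (seen, cleaned)).1.contains t = true
        ↔ t ∈ (ps.foldl pvCollect (seen, cleaned)).2)
    ∧ ps.foldl pvBetter (PySem.List.max? cleaned PySem.Str.len)
        = PySem.List.max? ((ps.foldl pvCollect (seen, cleaned)).2) PySem.Str.len := by
  induction ps generalizing seen cleaned with
  | nil => exact ⟨h, rfl⟩
  | cons p ps ih =>
    simp only [List.foldl_cons]
    by_cases he : PySem.Str.strip p = ""
    · have hA : pvCollect (seen, cleaned) p = (seen, cleaned) := by simp [pvCollect, he]
      have hB : pvBetter (PySem.List.max? cleaned PySem.Str.len) p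
          = PySem.List.max? cleaned PySem.Str.len := by simp [pvBetter, he]
      rw [hA, hB]
      exact ih seen cleaned h
    · by_cases hs : PySem.Str.strip p ∈ cleaned
      · have hin : PySem.Str.strip p ∈ seen := by simpa using (h _).mpr hs
        have hA : pvCollect (seen, cleaned) p = (seen, cleaned) := by
          simp [pvCollect, hin]
        rw [hA, pv_better_of_mem cleaned p hs]
        exact ih seen cleaned h
      · have hnin : PySem.Str.strip p ∉ seen := fun hin => hs ((h _).mp (by simpa using hin))
        have hA : pvCollect (seen, cleaned) p
            = (seen.add (PySem.Str.strip p), cleaned ++ [PySem.Str.strip p]) := by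
          simp [pvCollect, he, hnin]
        have hmem : ∀ t : String, t ∈ seen ↔ t ∈ cleaned := by
          intro t
          rw [← h t]
          simp
        have h' : ∀ t : String, (seen.add (PySem.Str.strip p)).contains t = true
            ↔ t ∈ cleaned ++ [PySem.Str.strip p] := by
          intro t
          simp [PySem.Set.mem_add, hmem t]
        have hB : pvBetter (PySem.List.max? cleaned PySem.Str.len) p
            = PySem.List.max? (cleaned ++ [PySem.Str.strip p]) PySem.Str.len := by
          rw [pv_better_ne _ _ he, pv_max?_append]
        rw [hA, hB]
        exact ih _ _ h'

-- invariant through the whole descriptions list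
lemma pv_outer (ds : List String) (seen : PySem.Set String) (cleaned : List String)
    (h : ∀ t : String, seen.contains t = true ↔ t ∈ cleaned) :
    ds.foldl (fun best description =>
        (((PySem.Str.split? (if description == "" then "" else description) "<SEP>").getD []).foldl
          pvBetter best)) (PySem.List.max? cleaned PySem.Str.len)
      = PySem.List.max?
          ((ds.foldl (fun st description =>
            (((PySem.Str.split? (if description == "" then "" else description) "<SEP>").getD []).foldl
              pvCollect st)) (seen, cleaned)).2) PySem.Str.len := by
  induction ds generalizing seen cleaned with
  | nil => rfl
  | cons d ds ih =>
    obtain ⟨h1, h2⟩ := pv_inner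
      ((PySem.Str.split? (if d == "" then "" else d) "<SEP>").getD []) seen cleaned h
    simp only [List.foldl_cons]
    rw [h2]
    exact ih _ _ h1

-- A's epilogue (empty test, maxD, truncation) equals B's epilogue on max? of the same list
lemma pv_final (cl : List String) (max_len : Int) :
    (if cl == [] then ""
     else
       let best := PySem.List.maxD cl PySem.Str.len ""
       if PySem.Str.len best > max_len then PySem.Str.slice best none (some max_len) ++ "..." else best)
    = match PySem.List.max? cl PySem.Str.len with
      | none => ""
      | some b => if PySem.Str.len b > max_len then PySem.Str.slice b none (some max_len) ++ "..." else b := by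
  cases cl with
  | nil => rfl
  | cons x l =>
    obtain ⟨m, hm⟩ := Option.isSome_iff_exists.mp (pv_max?_isSome x l)
    simp [PySem.List.maxD, hm]

-- ===== VERDICT (by name: the statement is the Claim_ definition above) =====
theorem pick_best_description_spec : Claim_equal_pick_best_description := by
  intro descriptions max_len _
  unfold Spec_pick_best_description
  have h0 : ∀ t : String, (PySem.Set.ofList ([] : List String)).contains t = true
      ↔ t ∈ ([] : List String) := by
    intro t
    simp [PySem.Set.ofList]
  have hout : descriptions.foldl (fun best description =>
        (((PySem.Str.split? (if description == "" then "" else description) "<SEP>").getD []).foldl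
          pvBetter best)) none
      = PySem.List.max?
          ((descriptions.foldl (fun st description =>
            (((PySem.Str.split? (if description == "" then "" else description) "<SEP>").getD []).foldl
              pvCollect st)) (PySem.Set.ofList [], ([] : List String))).2) PySem.Str.len :=
    pv_outer descriptions (PySem.Set.ofList []) [] h0
  show pick_best_description descriptions max_len = pick_best_description_alt descriptions max_len
  unfold pick_best_description pick_best_description_alt
  rw [hout, pv_final]
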